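-- pv_equiv track=rewrite | github.com/lordhegemon/Misc | CSVOrganizerAndPrinter.py | checkReorder
-- ===== SOURCE A (Python) =====
-- def checkReorder(lst, k):
--     reordered_lst = []
--     order = ['Oil Wells', 'Gas Wells', 'Coalbed Methane', 'Water Injection', 'Gas Injection', 'Water Disposal', 'Gas Storage', 'Water Source', 'Test Wells', 'Unknown Type', 'Total']
--     ignore_lst = ['Temporarily-Abandoned Wells', 'Plugged & Abandoned Wells', 'Locations Abandoned', 'Federal Lease Wells', 'Indian Lease Wells', 'State Lease Wells', 'Fee Lease Wells', 'Multi Lease', 'Total Wells Drilled', 'Total Non-Plugged Wells', 'Total Wells Capable of Producing', 'Total Holes not Completed']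
--
--     if k > 1:
--         if lst[0] not in ignore_lst:
--             for i in order:
--                 for j in lst:
--                     if i == j[0]:
--                         reordered_lst.append(j)
--             reordered_lst.insert(0, lst[0])
--             return reordered_lst
--
--     # else:
--     return lst
-- ===== SOURCE B (Python) =====
-- def checkReorder(lst, k):
--     order = ['Oil Wells', 'Gas Wells', 'Coalbed Methane', 'Water Injection', 'Gas Injection', 'Water Disposal', 'Gas Storage', 'Water Source', 'Test Wells', 'Unknown Type', 'Total']
--     if k > 1:
--         groups = {}
--         for row in lst:
--             groups.setdefault(row[0], []).append(row)
--         reordered = [lst[0]]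
--         for cat in order:
--             reordered.extend(groups.get(cat, []))
--         return reordered
--     return lst
-- ===== Notes on version B (the rewrite author's own statement) =====
-- stated objective: alternative
-- what changed: Replaces A's rescan of lst for each of the 11 categories by a single pass grouping rows by first field into a dict, then one emission pass over the fixed order; the dead 'lst[0] not in ignore_lst' test (a list never equals a string) is dropped.
import Mathlib
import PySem

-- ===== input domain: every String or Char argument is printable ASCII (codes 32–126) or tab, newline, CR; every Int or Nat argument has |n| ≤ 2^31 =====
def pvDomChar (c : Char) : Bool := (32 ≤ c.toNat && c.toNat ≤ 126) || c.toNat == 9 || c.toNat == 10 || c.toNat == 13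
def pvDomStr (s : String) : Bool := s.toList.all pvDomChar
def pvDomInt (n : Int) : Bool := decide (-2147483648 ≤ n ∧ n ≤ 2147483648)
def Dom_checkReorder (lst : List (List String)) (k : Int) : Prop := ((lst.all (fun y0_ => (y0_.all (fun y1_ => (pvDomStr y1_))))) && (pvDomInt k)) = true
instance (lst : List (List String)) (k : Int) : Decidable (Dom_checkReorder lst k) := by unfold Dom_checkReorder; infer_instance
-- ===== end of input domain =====

-- B builds a dict grouping rows by first field in one pass and emits the groups in the fixed
-- category order, instead of A's rescan of lst for every category (objective: alternative single-pass grouping).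

-- ===== PORT A =====
-- Python's 'row == s' between a list and a string is always False; ported exactly by this constant.
def pvRowEqStr (_row : List String) (_s : String) : Bool := false

def checkReorder (lst : List (List String)) (k : Int) : List (List String) :=
  let order : List String := ["Oil Wells", "Gas Wells", "Coalbed Methane", "Water Injection", "Gas Injection", "Water Disposal", "Gas Storage", "Water Source", "Test Wells", "Unknown Type", "Total"]
  let ignore_lst : List String := ["Temporarily-Abandoned Wells", "Plugged & Abandoned Wells", "Locations Abandoned", "Federal Lease Wells", "Indian Lease Wells", "State Lease Wells", "Fee Lease Wells", "Multi Lease", "Total Wells Drilled", "Total Non-Plugged Wells", "Total Wells Capable of Producing", "Total Holes not Completed"]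
  if k > 1 then
    -- 'lst[0] not in ignore_lst' : membership test of the first row against the ignore strings
    if (ignore_lst.any (fun s => pvRowEqStr ((PySem.List.pyGet? lst 0).getD []) s)) = false then
      let reordered_lst : List (List String) :=
        order.foldl (fun acc i =>
          lst.foldl (fun acc2 j =>
            if PySem.List.pyGet? j 0 = some i then acc2 ++ [j] else acc2) acc) []
      ((PySem.List.pyGet? lst 0).getD []) :: reordered_lst
    else lst
  else lst

-- ===== PORT B =====
def checkReorder_alt (lst : List (List String)) (k : Int) : List (List String) :=
  let order : List String := ["Oil Wells", "Gas Wells", "Coalbed Methane", "Water Injection", "Gas Injection", "Water Disposal", "Gas Storage", "Water Source", "Test Wells", "Unknown Type", "Total"]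
  if k > 1 then
    let groups : PySem.Dict String (List (List String)) :=
      lst.foldl (fun g row =>
        let key := (PySem.List.pyGet? row 0).getD ""
        g.insert key (g.getD key [] ++ [row])) PySem.Dict.empty
    order.foldl (fun acc cat => acc ++ groups.getD cat []) [((PySem.List.pyGet? lst 0).getD [])]
  else lst

-- ===== PRECONDITION & SPEC =====
-- Pre_ excludes exactly the inputs on which Python A raises IndexError: with k > 1,
-- an empty lst (lst[0]) or a lst containing an empty row (j[0]).
def Pre_checkReorder (lst : List (List String)) (k : Int) : Prop :=
  k > 1 → (lst ≠ [] ∧ ∀ row ∈ lst, row ≠ [])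
instance (lst : List (List String)) (k : Int) : Decidable (Pre_checkReorder lst k) := by unfold Pre_checkReorder; infer_instance

def pvWitness_checkReorder : List (List String) × Int :=
  ([["Total", "5"], ["Oil Wells", "2"], ["Header"]], 2)

def Spec_checkReorder (lst : List (List String)) (k : Int) (out : List (List String)) : Prop := out = checkReorder_alt lst k
instance (lst : List (List String)) (k : Int) (out : List (List String)) : Decidable (Spec_checkReorder lst k out) := by unfold Spec_checkReorder; infer_instance

-- ===== CLAIM (what is proved, stated in full; the proofs are below) =====
def Claim_equal_checkReorder : Prop := ∀ (lst : List (List String)) (k : Int), Dom_checkReorder lst k → Pre_checkReorder lst k → Spec_checkReorder lst k (checkReorder lst k)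

-- ===== LEMMAS AND PROOFS =====

-- The grouping fold's entry at `cat` is the rows whose first field is `cat`, in lst order.
lemma pv_groups_getD (lst : List (List String)) (g : PySem.Dict String (List (List String))) (cat : String) :
    (lst.foldl (fun g row =>
        let key := (PySem.List.pyGet? row 0).getD ""
        g.insert key (g.getD key [] ++ [row])) g).getD cat []
    = g.getD cat [] ++ lst.filter (fun row => (PySem.List.pyGet? row 0).getD "" == cat) := by
  induction lst generalizing g with
  | nil => simp
  | cons row rest ih =>
    simp only [List.foldl_cons, List.filter_cons, ih]
    by_cases h : (PySem.List.pyGet? row 0).getD "" = cat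
    · simp [h]
    · have h' : ¬ cat = (PySem.List.pyGet? row 0).getD "" := fun e => h e.symm
      simp [PySem.Dict.getD_insert, h, h']

-- A's inner rescan of lst for category `i` is lst.filter, provided rows are nonempty.
lemma pv_inner_filter (lst : List (List String)) (i : String) (acc : List (List String))
    (hrows : ∀ row ∈ lst, row ≠ []) :
    lst.foldl (fun acc2 j => if PySem.List.pyGet? j 0 = some i then acc2 ++ [j] else acc2) acc
    = acc ++ lst.filter (fun row => (PySem.List.pyGet? row 0).getD "" == i) := by
  induction lst generalizing acc with
  | nil => simp
  | cons row rest ih =>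
    have hrow : row ≠ [] := hrows row (by simp)
    have hrest : ∀ r ∈ rest, r ≠ [] := fun r hr => hrows r (by simp [hr])
    obtain ⟨x, xs, rfl⟩ : ∃ x xs, row = x :: xs := by
      cases row with
      | nil => exact absurd rfl hrow
      | cons x xs => exact ⟨x, xs, rfl⟩
    simp only [List.foldl_cons, List.filter_cons, ih _ hrest]
    by_cases h : x = i
    · simp [h]
    · simp [h]

-- Both emission folds over `order`, rewritten through the two lemmas above, coincide.
lemma pv_emit (cats : List String) (lst : List (List String)) (acc : List (List String))
    (hrows : ∀ row ∈ lst, row ≠ []) :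
    cats.foldl (fun acc i =>
        lst.foldl (fun acc2 j => if PySem.List.pyGet? j 0 = some i then acc2 ++ [j] else acc2) acc) acc
    = cats.foldl (fun acc cat => acc ++
        (lst.foldl (fun g row =>
          let key := (PySem.List.pyGet? row 0).getD ""
          g.insert key (g.getD key [] ++ [row])) PySem.Dict.empty).getD cat []) acc := by
  induction cats generalizing acc with
  | nil => rfl
  | cons c cs ih =>
    simp only [List.foldl_cons]
    rw [pv_inner_filter lst c acc hrows, pv_groups_getD, ih]
    have : (PySem.Dict.empty : PySem.Dict String (List (List String))).getD c [] = [] := rfl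
    rw [this, List.nil_append]

-- ===== VERDICT (by name: the statement is the Claim_ definition above) =====
theorem checkReorder_spec : Claim_equal_checkReorder := by
  intro lst k _hdom hpre
  unfold Spec_checkReorder checkReorder checkReorder_alt
  by_cases hk : k > 1
  · obtain ⟨hne, hrows⟩ := hpre hk
    simp only [if_pos hk]
    have hign : (["Temporarily-Abandoned Wells", "Plugged & Abandoned Wells", "Locations Abandoned", "Federal Lease Wells", "Indian Lease Wells", "State Lease Wells", "Fee Lease Wells", "Multi Lease", "Total Wells Drilled", "Total Non-Plugged Wells", "Total Wells Capable of Producing", "Total Holes not Completed"].any (fun s => pvRowEqStr ((PySem.List.pyGet? lst 0).getD []) s)) = false := by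
      simp [pvRowEqStr]
    rw [if_pos hign]
    rw [pv_emit _ lst [] hrows]
    rw [PySem.List.foldl_append_eq_flatMap, PySem.List.foldl_append_eq_flatMap]
    simp
  · simp [if_neg hk]
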